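-- pv_equiv track=rewrite | github.com/RUC-NLPIR/RAG-Critic | critic_agent/execute_agent.py | _fetch_final_answer_var_name
-- ===== SOURCE A (Python) =====
-- def _fetch_final_answer_var_name(code_snippet: str) -> str:
--     """Extract the variable name containing the final answer from code."""
--     code_lines = code_snippet.split("\n")
--     var_name = 'answer'
--     for line in code_lines[::-1]:
--         if line.startswith("#") or 'print' in line:
--             continue
--         if 'GenerateAnswer' in line:
--             var_name = line.split('=')[0].strip()
--             break
--     return var_name
-- ===== SOURCE B (Python) =====
-- def _fetch_final_answer_var_name(code_snippet: str) -> str: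
--     """Extract the variable name containing the final answer from code."""
--     var_name = 'answer'
--     for line in code_snippet.split("\n"):
--         if not (line.startswith("#") or 'print' in line) and 'GenerateAnswer' in line:
--             var_name = line.split('=')[0].strip()
--     return var_name
-- ===== Notes on version B (the rewrite author's own statement) =====
-- stated objective: simpler
-- what changed: Replaces the reversed scan with an early break by a single forward pass that keeps overwriting the accumulator on every matching line (last match wins), with the two skip tests folded into one condition; no list reversal and no break.
import Mathlib
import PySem

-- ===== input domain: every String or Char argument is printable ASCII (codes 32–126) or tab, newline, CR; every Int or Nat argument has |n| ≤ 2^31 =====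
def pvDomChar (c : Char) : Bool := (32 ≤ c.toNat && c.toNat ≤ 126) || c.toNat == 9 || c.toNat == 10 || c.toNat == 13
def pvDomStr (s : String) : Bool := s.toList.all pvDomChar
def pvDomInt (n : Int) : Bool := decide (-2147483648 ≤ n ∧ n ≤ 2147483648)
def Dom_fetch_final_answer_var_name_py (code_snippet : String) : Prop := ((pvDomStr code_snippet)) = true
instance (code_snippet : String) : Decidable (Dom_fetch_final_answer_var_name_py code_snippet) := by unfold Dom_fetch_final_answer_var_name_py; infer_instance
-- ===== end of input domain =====

-- B replaces A's reversed scan-with-break by one forward pass that overwrites the accumulator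
-- on every matching line (last match wins): simpler — no reversal, no break, one combined test.

-- ===== PORT A =====
-- line.split('=')[0].strip(): sep '=' is nonempty so split? is some, and str.split never
-- returns an empty list, so [0] is the head (exact).
def pvExtract (line : String) : String :=
  PySem.Str.strip (((PySem.Str.split? line "=").getD []).headD "")

-- the for-loop over the reversed lines, with `continue` and `break` as in A
def pvALoop : List String → String → String
  | [], var_name => var_name
  | line :: rest, var_name =>
    if PySem.Str.startswith line "#" || PySem.Str.isIn "print" line then
      pvALoop rest var_name          -- continue
    else if PySem.Str.isIn "GenerateAnswer" line then
      pvExtract line                  -- var_name = …; break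
    else
      pvALoop rest var_name

def fetch_final_answer_var_name_py (code_snippet : String) : String :=
  let code_lines := (PySem.Str.split? code_snippet "\n").getD []
  -- code_lines[::-1]  (PySem.List.slice? … (-1) = some reverse, lemma slice?_none_none_neg_one)
  pvALoop ((PySem.List.slice? code_lines none none (-1)).getD []) "answer"

-- ===== PORT B =====
def pvBStep (var_name line : String) : String :=
  if (!(PySem.Str.startswith line "#" || PySem.Str.isIn "print" line))
      && PySem.Str.isIn "GenerateAnswer" line then
    pvExtract line
  else
    var_name

def fetch_final_answer_var_name_py_alt (code_snippet : String) : String :=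
  ((PySem.Str.split? code_snippet "\n").getD []).foldl pvBStep "answer"

-- ===== PRECONDITION & SPEC =====
def Spec_fetch_final_answer_var_name_py (code_snippet : String) (out : String) : Prop := out = fetch_final_answer_var_name_py_alt code_snippet
instance (code_snippet : String) (out : String) : Decidable (Spec_fetch_final_answer_var_name_py code_snippet out) := by unfold Spec_fetch_final_answer_var_name_py; infer_instance

-- ===== CLAIM (what is proved, stated in full; the proofs are below) =====
def Claim_equal_fetch_final_answer_var_name_py : Prop := ∀ (code_snippet : String), Dom_fetch_final_answer_var_name_py code_snippet → Spec_fetch_final_answer_var_name_py code_snippet (fetch_final_answer_var_name_py code_snippet)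

-- ===== LEMMAS AND PROOFS =====

-- A's reverse loop computes B's forward fold: scanning xs with break-on-first-match
-- equals folding xs.reverse overwriting on every match.
theorem pvALoop_eq_foldl_reverse (xs : List String) (acc : String) :
    pvALoop xs acc = xs.reverse.foldl pvBStep acc := by
  induction xs generalizing acc with
  | nil => rfl
  | cons line rest ih =>
    rw [List.reverse_cons, List.foldl_append, List.foldl_cons, List.foldl_nil]
    cases hskip : (PySem.Str.startswith line "#" || PySem.Str.isIn "print" line) with
    | true =>
      simp only [pvALoop, pvBStep, hskip, Bool.not_true, Bool.false_and, if_true, ih, Bool.false_eq_true, if_false]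
    | false =>
      cases hgen : PySem.Str.isIn "GenerateAnswer" line with
      | true =>
        simp only [pvALoop, pvBStep, hskip, hgen, Bool.not_false, Bool.true_and, if_true, Bool.false_eq_true, if_false]
      | false =>
        simp only [pvALoop, pvBStep, hskip, hgen, Bool.not_false, Bool.true_and, ih, Bool.false_eq_true, if_false]

-- ===== VERDICT (by name: the statement is the Claim_ definition above) =====
theorem fetch_final_answer_var_name_py_spec : Claim_equal_fetch_final_answer_var_name_py := by
  intro s _
  unfold Spec_fetch_final_answer_var_name_py
  unfold fetch_final_answer_var_name_py fetch_final_answer_var_name_py_alt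
  simp only [PySem.List.slice?_none_none_neg_one, Option.getD_some]
  rw [pvALoop_eq_foldl_reverse, List.reverse_reverse]
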